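-- pv_equiv track=rewrite | github.com/k0rd/bakerrrr | engine/buildings.py | _wall_point_from_bias
-- ===== SOURCE A (Python) =====
-- def _clamp(value, low, high):
--     return max(int(low), min(int(high), int(value)))
--
-- def _wall_points(left, right, top, bottom, side):
--     left = int(left)
--     right = int(right)
--     top = int(top)
--     bottom = int(bottom)
--     side = str(side or "south").strip().lower() or "south"
--
--     if side == "north":
--         xs = list(range(left + 1, right))
--         if not xs:
--             xs = [(left + right) // 2]
--         return [(int(x), top, 0) for x in xs]
--     if side == "south":
--         xs = list(range(left + 1, right))
--         if not xs:
--             xs = [(left + right) // 2]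
--         return [(int(x), bottom, 0) for x in xs]
--     if side == "west":
--         ys = list(range(top + 1, bottom))
--         if not ys:
--             ys = [(top + bottom) // 2]
--         return [(left, int(y), 0) for y in ys]
--
--     ys = list(range(top + 1, bottom))
--     if not ys:
--         ys = [(top + bottom) // 2]
--     return [(right, int(y), 0) for y in ys]
--
-- def _wall_point_from_bias(left, right, top, bottom, side, bias):
--     points = _wall_points(left, right, top, bottom, side)
--     if not points:
--         return int(left), int(bottom)
--
--     side = str(side or "south").strip().lower() or "south"
--     if side in {"north", "south"}:
--         xs = [point[0] for point in points]
--         target_x = _clamp(int(bias), min(xs), max(xs))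
--         for x, y, _ in points:
--             if int(x) == target_x:
--                 return int(x), int(y)
--     else:
--         ys = [point[1] for point in points]
--         target_y = _clamp(int(bias), min(ys), max(ys))
--         for x, y, _ in points:
--             if int(y) == target_y:
--                 return int(x), int(y)
--     x, y, _ = points[len(points) // 2]
--     return int(x), int(y)
-- ===== SOURCE B (Python) =====
-- def _wall_point_from_bias(left, right, top, bottom, side, bias):
--     left = int(left); right = int(right); top = int(top); bottom = int(bottom)
--     s = str(side or "south").strip().lower() or "south"
--     if s in ("north", "south"):
--         x = max(left + 1, min(right - 1, int(bias))) if left + 1 < right else (left + right) // 2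
--         return x, (top if s == "north" else bottom)
--     y = max(top + 1, min(bottom - 1, int(bias))) if top + 1 < bottom else (top + bottom) // 2
--     return (left if s == "west" else right), y
-- ===== Notes on version B (the rewrite author's own statement) =====
-- stated objective: faster
-- what changed: B replaces A's build-a-point-list / min-max scan / linear search with a direct O(1) clamp of the bias into the contiguous wall range (or the midpoint when the range is empty), paired with the fixed edge coordinate.
import Mathlib
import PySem

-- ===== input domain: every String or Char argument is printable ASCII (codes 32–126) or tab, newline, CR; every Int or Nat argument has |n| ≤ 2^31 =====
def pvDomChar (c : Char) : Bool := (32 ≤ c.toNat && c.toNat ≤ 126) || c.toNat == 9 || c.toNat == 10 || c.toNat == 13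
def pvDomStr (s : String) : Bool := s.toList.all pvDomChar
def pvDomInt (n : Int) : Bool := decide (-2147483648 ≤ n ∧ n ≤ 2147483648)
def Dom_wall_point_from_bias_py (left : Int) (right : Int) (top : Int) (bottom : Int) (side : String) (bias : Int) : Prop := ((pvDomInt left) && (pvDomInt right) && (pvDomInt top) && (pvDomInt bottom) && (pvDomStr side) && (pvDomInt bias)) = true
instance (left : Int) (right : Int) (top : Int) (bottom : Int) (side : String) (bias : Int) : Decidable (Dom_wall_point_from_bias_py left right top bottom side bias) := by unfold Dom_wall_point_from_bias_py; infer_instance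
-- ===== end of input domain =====

-- B replaces A's point-list build / min-max scan / linear search with an O(1) clamp of the
-- bias into the contiguous wall range; equivalence is proved on all inputs (both are total).

-- ===== PORT A =====
-- str(side or "south").strip().lower() or "south"  (the normalisation both Python versions contain verbatim)
def pvNormSide (s : String) : String :=
  let t := PySem.Str.lower (PySem.Str.strip (if s = "" then "south" else s))
  if t = "" then "south" else t

-- _clamp(value, low, high)
def pvClamp (value low high : Int) : Int := max low (min high value)

-- _wall_points(left, right, top, bottom, side)
def pvWallPoints (left right top bottom : Int) (side : String) : List (Int × Int × Int) :=
  let s := pvNormSide side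
  if s = "north" then
    let xs := PySem.List.pyRange (left + 1) right 1
    let xs := if xs = [] then [PySem.Int.floordiv (left + right) 2] else xs
    xs.map (fun x => (x, top, 0))
  else if s = "south" then
    let xs := PySem.List.pyRange (left + 1) right 1
    let xs := if xs = [] then [PySem.Int.floordiv (left + right) 2] else xs
    xs.map (fun x => (x, bottom, 0))
  else if s = "west" then
    let ys := PySem.List.pyRange (top + 1) bottom 1
    let ys := if ys = [] then [PySem.Int.floordiv (top + bottom) 2] else ys
    ys.map (fun y => (left, y, 0))
  else
    let ys := PySem.List.pyRange (top + 1) bottom 1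
    let ys := if ys = [] then [PySem.Int.floordiv (top + bottom) 2] else ys
    ys.map (fun y => (right, y, 0))

-- the 'for x, y, _ in points: if int(x) == target_x: return int(x), int(y)' loop
def pvFindX : List (Int × Int × Int) → Int → Option (Int × Int)
  | [], _ => none
  | (x, y, _) :: rest, t => if x = t then some (x, y) else pvFindX rest t

-- the same loop keyed on y
def pvFindY : List (Int × Int × Int) → Int → Option (Int × Int)
  | [], _ => none
  | (x, y, _) :: rest, t => if y = t then some (x, y) else pvFindY rest t

-- _wall_point_from_bias.  min()/max() are taken on a list that is nonempty by construction,
-- so the '.getD 0' default (Python's raise-on-empty) is unreachable, as is the final fallback.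
def wall_point_from_bias_py (left : Int) (right : Int) (top : Int) (bottom : Int) (side : String) (bias : Int) : Int × Int :=
  let points := pvWallPoints left right top bottom side
  if points = [] then (left, bottom)
  else
    let s := pvNormSide side
    if s = "north" ∨ s = "south" then
      let xs := points.map (fun p => p.1)
      let tx := pvClamp bias ((PySem.List.min? xs (fun v => v)).getD 0) ((PySem.List.max? xs (fun v => v)).getD 0)
      match pvFindX points tx with
      | some p => p
      | none =>
        let p := PySem.List.pyGetD points (PySem.Int.floordiv (points.length : Int) 2) (0, 0, 0)
        (p.1, p.2.1)
    else
      let ys := points.map (fun p => p.2.1)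
      let ty := pvClamp bias ((PySem.List.min? ys (fun v => v)).getD 0) ((PySem.List.max? ys (fun v => v)).getD 0)
      match pvFindY points ty with
      | some p => p
      | none =>
        let p := PySem.List.pyGetD points (PySem.Int.floordiv (points.length : Int) 2) (0, 0, 0)
        (p.1, p.2.1)

-- ===== PORT B =====
def wall_point_from_bias_py_alt (left : Int) (right : Int) (top : Int) (bottom : Int) (side : String) (bias : Int) : Int × Int :=
  let s := pvNormSide side
  if s = "north" ∨ s = "south" then
    let x := if left + 1 < right then max (left + 1) (min (right - 1) bias)
             else PySem.Int.floordiv (left + right) 2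
    (x, if s = "north" then top else bottom)
  else
    let y := if top + 1 < bottom then max (top + 1) (min (bottom - 1) bias)
             else PySem.Int.floordiv (top + bottom) 2
    ((if s = "west" then left else right), y)

-- ===== PRECONDITION & SPEC =====

-- ===== PRECONDITION & SPEC =====
def Spec_wall_point_from_bias_py (left : Int) (right : Int) (top : Int) (bottom : Int) (side : String) (bias : Int) (out : Int × Int) : Prop := out = wall_point_from_bias_py_alt left right top bottom side bias
instance (left : Int) (right : Int) (top : Int) (bottom : Int) (side : String) (bias : Int) (out : Int × Int) : Decidable (Spec_wall_point_from_bias_py left right top bottom side bias out) := by unfold Spec_wall_point_from_bias_py; infer_instance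

-- ===== CLAIM (what is proved, stated in full; the proofs are below) =====
def Claim_equal_wall_point_from_bias_py : Prop := ∀ (left : Int) (right : Int) (top : Int) (bottom : Int) (side : String) (bias : Int), Dom_wall_point_from_bias_py left right top bottom side bias → Spec_wall_point_from_bias_py left right top bottom side bias (wall_point_from_bias_py left right top bottom side bias)

-- ===== LEMMAS AND PROOFS =====

lemma proj1_map (xs : List Int) (c : Int) :
    (xs.map (fun x => (x, c, (0:Int)))).map (fun p => p.1) = xs := by
  induction xs with
  | nil => rfl
  | cons x rest ih => simp [ih]

lemma proj2_map (ys : List Int) (c : Int) :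
    (ys.map (fun y => (c, y, (0:Int)))).map (fun p => p.2.1) = ys := by
  induction ys with
  | nil => rfl
  | cons y rest ih => simp [ih]

lemma pvFindX_map (xs : List Int) (c t : Int) :
    pvFindX (xs.map (fun x => (x, c, 0))) t = if t ∈ xs then some (t, c) else none := by
  induction xs with
  | nil => simp [pvFindX]
  | cons x rest ih =>
    simp only [List.map_cons, pvFindX, List.mem_cons]
    by_cases h : x = t
    · subst h; simp
    · simp [h, ih, Ne.symm h]

lemma pvFindY_map (ys : List Int) (c t : Int) :
    pvFindY (ys.map (fun y => (c, y, 0))) t = if t ∈ ys then some (c, t) else none := by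
  induction ys with
  | nil => simp [pvFindY]
  | cons y rest ih =>
    simp only [List.map_cons, pvFindY, List.mem_cons]
    by_cases h : y = t
    · subst h; simp
    · simp [h, ih, Ne.symm h]

lemma min?_pyRange (a b : Int) (h : a < b) :
    PySem.List.min? (PySem.List.pyRange a b 1) (fun v => v) = some a := by
  have hmem : a ∈ PySem.List.pyRange a b 1 := by
    rw [PySem.List.mem_pyRange_one]; omega
  obtain ⟨m, hm⟩ : ∃ m, PySem.List.min? (PySem.List.pyRange a b 1) (fun v => v) = some m := by
    cases hmin : PySem.List.min? (PySem.List.pyRange a b 1) (fun v => v) with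
    | none => rw [PySem.List.min?_eq_none_iff] at hmin; simp [hmin] at hmem
    | some m => exact ⟨m, rfl⟩
  have h1 : m ∈ PySem.List.pyRange a b 1 := PySem.List.min?_mem hm
  have h2 : m ≤ a := PySem.List.min?_isMin hm a hmem
  rw [PySem.List.mem_pyRange_one] at h1
  rw [hm]; congr 1; omega

lemma max?_pyRange (a b : Int) (h : a < b) :
    PySem.List.max? (PySem.List.pyRange a b 1) (fun v => v) = some (b - 1) := by
  have hmem : b - 1 ∈ PySem.List.pyRange a b 1 := by
    rw [PySem.List.mem_pyRange_one]; omega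
  obtain ⟨m, hm⟩ : ∃ m, PySem.List.max? (PySem.List.pyRange a b 1) (fun v => v) = some m := by
    cases hmax : PySem.List.max? (PySem.List.pyRange a b 1) (fun v => v) with
    | none => rw [PySem.List.max?_eq_none_iff] at hmax; simp [hmax] at hmem
    | some m => exact ⟨m, rfl⟩
  have h1 : m ∈ PySem.List.pyRange a b 1 := PySem.List.max?_mem hm
  have h2 : b - 1 ≤ m := PySem.List.max?_isMax hm (b - 1) hmem
  rw [PySem.List.mem_pyRange_one] at h1
  rw [hm]; congr 1; omega

-- ===== VERDICT (by name: the statement is the Claim_ definition above) =====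
theorem wall_point_from_bias_py_spec : Claim_equal_wall_point_from_bias_py := by
  intro left right top bottom side bias _
  unfold Spec_wall_point_from_bias_py
  unfold wall_point_from_bias_py wall_point_from_bias_py_alt pvWallPoints
  by_cases h1 : pvNormSide side = "north"
  · -- north: horizontal wall at y = top
    simp only [h1, String.reduceEq, reduceIte, true_or, ite_true]
    by_cases hab : left + 1 < right
    · have hne : PySem.List.pyRange (left + 1) right 1 ≠ [] := by
        rw [PySem.List.pyRange_one_cons hab]; simp
      simp only [eq_false hne, ite_false]
      have hmapne : List.map (fun x => (x, top, (0:Int))) (PySem.List.pyRange (left + 1) right 1) ≠ [] := by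
        simp [hne]
      rw [if_neg hmapne, proj1_map, min?_pyRange _ _ hab, max?_pyRange _ _ hab]
      simp only [Option.getD_some]
      have hmem : pvClamp bias (left + 1) (right - 1) ∈ PySem.List.pyRange (left + 1) right 1 := by
        rw [PySem.List.mem_pyRange_one]; unfold pvClamp; omega
      rw [pvFindX_map, if_pos hmem, if_pos hab]
      rfl
    · have hnil := PySem.List.pyRange_one_eq_nil (show right ≤ left + 1 by omega)
      rw [if_neg hab, hnil]
      have hclamp : pvClamp bias (PySem.Int.floordiv (left + right) 2) (PySem.Int.floordiv (left + right) 2)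
          = PySem.Int.floordiv (left + right) 2 := by unfold pvClamp; omega
      simp only [reduceIte, List.map_cons, List.map_nil, PySem.List.min?_id_cons,
        PySem.List.max?_id_cons, List.foldl_nil, Option.getD_some]
      rw [hclamp]
      simp [pvFindX]
  · by_cases h2 : pvNormSide side = "south"
    · -- south: horizontal wall at y = bottom
      simp only [h2, String.reduceEq, reduceIte, or_true, ite_true]
      by_cases hab : left + 1 < right
      · have hne : PySem.List.pyRange (left + 1) right 1 ≠ [] := by
          rw [PySem.List.pyRange_one_cons hab]; simp
        simp only [eq_false hne, ite_false]
        have hmapne : List.map (fun x => (x, bottom, (0:Int))) (PySem.List.pyRange (left + 1) right 1) ≠ [] := by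
          simp [hne]
        rw [if_neg hmapne, proj1_map, min?_pyRange _ _ hab, max?_pyRange _ _ hab]
        simp only [Option.getD_some]
        have hmem : pvClamp bias (left + 1) (right - 1) ∈ PySem.List.pyRange (left + 1) right 1 := by
          rw [PySem.List.mem_pyRange_one]; unfold pvClamp; omega
        rw [pvFindX_map, if_pos hmem, if_pos hab]
        rfl
      · have hnil := PySem.List.pyRange_one_eq_nil (show right ≤ left + 1 by omega)
        rw [if_neg hab, hnil]
        have hclamp : pvClamp bias (PySem.Int.floordiv (left + right) 2) (PySem.Int.floordiv (left + right) 2)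
            = PySem.Int.floordiv (left + right) 2 := by unfold pvClamp; omega
        simp only [reduceIte, List.map_cons, List.map_nil, PySem.List.min?_id_cons,
          PySem.List.max?_id_cons, List.foldl_nil, Option.getD_some]
        rw [hclamp]
        simp [pvFindX]
    · by_cases h3 : pvNormSide side = "west"
      · -- west: vertical wall at x = left
        simp only [h3, String.reduceEq, reduceIte, or_self, ite_false]
        by_cases hab : top + 1 < bottom
        · have hne : PySem.List.pyRange (top + 1) bottom 1 ≠ [] := by
            rw [PySem.List.pyRange_one_cons hab]; simp
          simp only [eq_false hne, ite_false]
          have hmapne : List.map (fun y => (left, y, (0:Int))) (PySem.List.pyRange (top + 1) bottom 1) ≠ [] := by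
            simp [hne]
          rw [if_neg hmapne, proj2_map, min?_pyRange _ _ hab, max?_pyRange _ _ hab]
          simp only [Option.getD_some]
          have hmem : pvClamp bias (top + 1) (bottom - 1) ∈ PySem.List.pyRange (top + 1) bottom 1 := by
            rw [PySem.List.mem_pyRange_one]; unfold pvClamp; omega
          rw [pvFindY_map, if_pos hmem, if_pos hab]
          rfl
        · have hnil := PySem.List.pyRange_one_eq_nil (show bottom ≤ top + 1 by omega)
          rw [if_neg hab, hnil]
          have hclamp : pvClamp bias (PySem.Int.floordiv (top + bottom) 2) (PySem.Int.floordiv (top + bottom) 2)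
              = PySem.Int.floordiv (top + bottom) 2 := by unfold pvClamp; omega
          simp only [reduceIte, List.map_cons, List.map_nil, PySem.List.min?_id_cons,
            PySem.List.max?_id_cons, List.foldl_nil, Option.getD_some]
          rw [hclamp]
          simp [pvFindY]
      · -- any other side string: vertical wall at x = right
        simp only [eq_false h1, eq_false h2, eq_false h3, or_self, ite_false]
        by_cases hab : top + 1 < bottom
        · have hne : PySem.List.pyRange (top + 1) bottom 1 ≠ [] := by
            rw [PySem.List.pyRange_one_cons hab]; simp
          simp only [eq_false hne, ite_false]
          have hmapne : List.map (fun y => (right, y, (0:Int))) (PySem.List.pyRange (top + 1) bottom 1) ≠ [] := by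
            simp [hne]
          rw [if_neg hmapne, proj2_map, min?_pyRange _ _ hab, max?_pyRange _ _ hab]
          simp only [Option.getD_some]
          have hmem : pvClamp bias (top + 1) (bottom - 1) ∈ PySem.List.pyRange (top + 1) bottom 1 := by
            rw [PySem.List.mem_pyRange_one]; unfold pvClamp; omega
          rw [pvFindY_map, if_pos hmem, if_pos hab]
          rfl
        · have hnil := PySem.List.pyRange_one_eq_nil (show bottom ≤ top + 1 by omega)
          rw [if_neg hab, hnil]
          have hclamp : pvClamp bias (PySem.Int.floordiv (top + bottom) 2) (PySem.Int.floordiv (top + bottom) 2)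
              = PySem.Int.floordiv (top + bottom) 2 := by unfold pvClamp; omega
          simp only [reduceIte, List.map_cons, List.map_nil, PySem.List.min?_id_cons,
            PySem.List.max?_id_cons, List.foldl_nil, Option.getD_some]
          rw [hclamp]
          simp [pvFindY]
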